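-- pv_equiv track=rewrite | github.com/Lanmi5925/practice_task | 05-rectangle.py | place_rect
-- ===== SOURCE A (Python) =====
-- def place_rect(n):
-- 	if n == 1:
-- 		return 1
-- 	elif n == 2:
-- 		return 2
-- 	else:
-- 		f = place_rect(n-1) + place_rect(n-2)
-- 		return f
-- ===== SOURCE B (Python) =====
-- def place_rect(n):
-- 	a, b = 1, 2
-- 	for _ in range(n - 1):
-- 		a, b = b, a + b
-- 	return a
-- ===== Notes on version B (the rewrite author's own statement) =====
-- stated objective: faster
-- what changed: Replaced the naive binary recursion with an iterative bottom-up loop keeping the last two values, so each value is computed once; intended as faster; in a timing run A timed out at moderate n where B returned instantly, so no ratio was confirmed.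
import Mathlib
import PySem

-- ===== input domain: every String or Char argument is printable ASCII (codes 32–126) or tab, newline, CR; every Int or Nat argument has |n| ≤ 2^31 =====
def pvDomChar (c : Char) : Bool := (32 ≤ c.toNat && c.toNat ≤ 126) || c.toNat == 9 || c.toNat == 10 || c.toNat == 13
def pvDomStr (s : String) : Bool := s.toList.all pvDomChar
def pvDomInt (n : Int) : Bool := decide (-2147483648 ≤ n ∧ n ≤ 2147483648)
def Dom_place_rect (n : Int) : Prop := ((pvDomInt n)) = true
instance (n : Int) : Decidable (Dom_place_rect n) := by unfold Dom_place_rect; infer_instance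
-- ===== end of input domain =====

-- B replaces A's binary recursion by an iterative two-variable loop; intended as faster; in a timing run A timed out at moderate n where B returned instantly, so no ratio was confirmed.


-- ===== PORT A =====
-- A's recursion, carried out on n.toNat (Pre_ restricts to n ≥ 1, where the two agree;
-- the value at 0 is junk making the recursion well-founded — A diverges there).
def placeRectRec : Nat → Int
  | 0 => 0
  | 1 => 1
  | 2 => 2
  | (m+3) => placeRectRec (m+2) + placeRectRec (m+1)

def place_rect (n : Int) : Int := placeRectRec n.toNat

-- ===== PORT B =====
-- Source B: a, b = 1, 2; for _ in range(n-1): a, b = b, a+b; return a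
def place_rect_alt (n : Int) : Int :=
  ((PySem.List.pyRange 0 (n - 1) 1).foldl
      (fun (st : Int × Int) _ => (st.2, st.1 + st.2)) (1, 2)).1

-- ===== PRECONDITION & SPEC =====
-- Pre_ excludes n ≤ 0, on which the Python A recurses without a base case and raises RecursionError.
def Pre_place_rect (n : Int) : Prop := 1 ≤ n
instance (n : Int) : Decidable (Pre_place_rect n) := by unfold Pre_place_rect; infer_instance
def pvWitness_place_rect : Int := 5

def Spec_place_rect (n : Int) (out : Int) : Prop := out = place_rect_alt n
instance (n : Int) (out : Int) : Decidable (Spec_place_rect n out) := by unfold Spec_place_rect; infer_instance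

-- ===== CLAIM (what is proved, stated in full; the proofs are below) =====
def Claim_equal_place_rect : Prop := ∀ (n : Int), Dom_place_rect n → Pre_place_rect n → Spec_place_rect n (place_rect n)

-- ===== LEMMAS AND PROOFS =====

-- a fold that ignores the elements is function iteration on the length
theorem foldl_const_iterate {α β : Type} (f : α → α) :
    ∀ (l : List β) (init : α), l.foldl (fun st _ => f st) init = f^[l.length] init := by
  intro l
  induction l with
  | nil => intro init; rfl
  | cons x xs ih =>
      intro init
      simp [List.foldl, ih, Function.iterate_succ_apply]

theorem iterate_pair (k : Nat) :
    (fun (st : Int × Int) => (st.2, st.1 + st.2))^[k] (1, 2)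
      = (placeRectRec (k + 1), placeRectRec (k + 2)) := by
  induction k with
  | zero => simp [placeRectRec]
  | succ m ih =>
      rw [Function.iterate_succ_apply', ih]
      show (placeRectRec (m + 2), placeRectRec (m + 1) + placeRectRec (m + 2)) = _
      rw [show m + 1 + 2 = m + 3 from rfl, placeRectRec]
      ring_nf

-- ===== VERDICT (by name: the statement is the Claim_ definition above) =====
theorem place_rect_spec : Claim_equal_place_rect := by
  intro n _ hn
  have hn1 : 1 ≤ n := hn
  show place_rect n = place_rect_alt n
  unfold place_rect place_rect_alt
  rw [foldl_const_iterate, PySem.List.length_pyRange_one, iterate_pair]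
  have h1 : (n - 1 - 0).toNat + 1 = n.toNat := by omega
  rw [h1]
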